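-- pv_equiv track=rewrite | github.com/Gamma-Software/AppifyAi | generative_app/core/chains/conversational_retrieval_over_code.py | remove_entrypoint
-- ===== SOURCE A (Python) =====
-- def remove_entrypoint(code):
--     lines = code.split("\n")
--     modified_lines = []
--     entrypoint_found = False
--     for line in lines:
--         if (
--             line.strip() == 'if __name__ == "__main__":'
--             or line.strip() == "if __name__ == '__main__':"
--         ):
--             entrypoint_found = True
--         elif entrypoint_found:
--             modified_lines.append(line.lstrip())
--         else:
--             modified_lines.append(line)
--
--     modified_code = "\n".join(modified_lines)
--     modified_code = modified_code.rstrip()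
--     return modified_code
-- ===== SOURCE B (Python) =====
-- MARKERS = ('if __name__ == "__main__":', "if __name__ == '__main__':")
--
--
-- def remove_entrypoint(code):
--     lines = code.split("\n")
--     i = next((k for k, line in enumerate(lines) if line.strip() in MARKERS), None)
--     if i is None:
--         return code.rstrip()
--     tail = [l.lstrip() for l in lines[i + 1:] if l.strip() not in MARKERS]
--     return "\n".join(lines[:i] + tail).rstrip()
-- ===== Notes on version B (the rewrite author's own statement) =====
-- stated objective: simpler
-- what changed: Replaces the stateful flag loop with find-first-marker-index then slice: the prefix is taken verbatim, the tail is a filter-out-markers + lstrip comprehension, and the no-marker case is just code.rstrip().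
import Mathlib
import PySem

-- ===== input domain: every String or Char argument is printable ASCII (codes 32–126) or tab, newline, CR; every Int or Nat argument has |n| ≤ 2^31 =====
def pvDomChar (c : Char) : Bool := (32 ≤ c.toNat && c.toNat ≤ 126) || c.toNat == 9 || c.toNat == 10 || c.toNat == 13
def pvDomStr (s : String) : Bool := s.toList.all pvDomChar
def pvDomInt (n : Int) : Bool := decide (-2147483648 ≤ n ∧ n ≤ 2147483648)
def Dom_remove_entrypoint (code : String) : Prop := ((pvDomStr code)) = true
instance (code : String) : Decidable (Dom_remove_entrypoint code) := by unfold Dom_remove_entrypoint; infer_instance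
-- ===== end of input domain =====

-- B removes the `if __name__ == "__main__":` block boundary by locating the first marker line and slicing,
-- instead of A's stateful flag loop; objective: simpler decomposition, same cost.

-- ===== PORT A =====
def remove_entrypoint (code : String) : String :=
  let lines := (PySem.Str.split? code "\n").getD []
  let st := lines.foldl (fun (st : Bool × List String) line =>
      if PySem.Str.strip line == "if __name__ == \"__main__\":"
          || PySem.Str.strip line == "if __name__ == '__main__':" then
        (true, st.2)
      else if st.1 then (st.1, st.2 ++ [PySem.Str.lstrip line])
      else (st.1, st.2 ++ [line])) (false, [])
  PySem.Str.rstrip (PySem.Str.join "\n" st.2)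

-- ===== PORT B =====
def pvMarkers : List String := ["if __name__ == \"__main__\":", "if __name__ == '__main__':"]

def pvIsMarker (line : String) : Bool := pvMarkers.contains (PySem.Str.strip line)

def remove_entrypoint_alt (code : String) : String :=
  let lines := (PySem.Str.split? code "\n").getD []
  match lines.findIdx? pvIsMarker with
  | none => PySem.Str.rstrip code
  | some i =>
      let tail := ((lines.drop (i+1)).filter (fun l => !pvIsMarker l)).map PySem.Str.lstrip
      PySem.Str.rstrip (PySem.Str.join "\n" (lines.take i ++ tail))

-- ===== PRECONDITION & SPEC =====
def Spec_remove_entrypoint (code : String) (out : String) : Prop := out = remove_entrypoint_alt code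
instance (code : String) (out : String) : Decidable (Spec_remove_entrypoint code out) := by unfold Spec_remove_entrypoint; infer_instance

-- ===== CLAIM (what is proved, stated in full; the proofs are below) =====
def Claim_equal_remove_entrypoint : Prop := ∀ (code : String), Dom_remove_entrypoint code → Spec_remove_entrypoint code (remove_entrypoint code)

-- ===== LEMMAS AND PROOFS =====

-- A's inline marker test is B's `pvIsMarker`
theorem pv_marker_eq (s : String) :
    (PySem.Str.strip s == "if __name__ == \"__main__\":"
      || PySem.Str.strip s == "if __name__ == '__main__':") = pvIsMarker s := by
  simp [pvIsMarker, pvMarkers, beq_eq_decide]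

-- A's fold step, written with pvIsMarker
def pvGA (st : Bool × List String) (line : String) : Bool × List String :=
  if pvIsMarker line then (true, st.2)
  else if st.1 then (st.1, st.2 ++ [PySem.Str.lstrip line])
  else (st.1, st.2 ++ [line])

theorem pv_lam_eq :
    (fun (st : Bool × List String) line =>
      if PySem.Str.strip line == "if __name__ == \"__main__\":"
          || PySem.Str.strip line == "if __name__ == '__main__':" then
        (true, st.2)
      else if st.1 then (st.1, st.2 ++ [PySem.Str.lstrip line])
      else (st.1, st.2 ++ [line])) = pvGA := by
  funext st line
  rw [pvGA, pv_marker_eq]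

theorem pv_fold_true (ls : List String) (acc : List String) :
    ls.foldl pvGA (true, acc)
      = (true, acc ++ (ls.filter (fun l => !pvIsMarker l)).map PySem.Str.lstrip) := by
  induction ls generalizing acc with
  | nil => simp
  | cons l rest ih =>
      by_cases h : pvIsMarker l = true
      · simp [pvGA, h, ih]
      · simp [pvGA, h, ih]

theorem pv_fold_main (ls : List String) (acc : List String) :
    (ls.foldl pvGA (false, acc)).2
      = match ls.findIdx? pvIsMarker with
        | none => acc ++ ls
        | some i => acc ++ (ls.take i
            ++ ((ls.drop (i+1)).filter (fun l => !pvIsMarker l)).map PySem.Str.lstrip) := by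
  induction ls generalizing acc with
  | nil => simp
  | cons l rest ih =>
      by_cases h : pvIsMarker l = true
      · simp [pvGA, h, pv_fold_true, List.findIdx?_cons]
      · rw [List.foldl_cons]
        have hstep : pvGA (false, acc) l = (false, acc ++ [l]) := by
          simp [pvGA, h]
        rw [hstep, ih (acc ++ [l])]
        rw [List.findIdx?_cons, if_neg (by simp [h])]
        cases hr : rest.findIdx? pvIsMarker with
        | none => simp
        | some j => simp [List.take_succ_cons, List.drop_succ_cons]

-- pure one-pass spec of PySem.Chars.splitOn.go at separator ['\n']
def pvSp (l cur : List Char) : List (List Char) :=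
  match l with
  | [] => [cur.reverse]
  | c :: rest => if c = '\n' then cur.reverse :: pvSp rest [] else pvSp rest (c :: cur)

theorem pv_go_cons (n : Nat) (c : Char) (rest cur : List Char) (acc : List (List Char)) :
    PySem.Chars.splitOn.go ['\n'] (n+1) (c :: rest) cur acc =
      if c = '\n' then PySem.Chars.splitOn.go ['\n'] n rest [] (cur.reverse :: acc)
      else PySem.Chars.splitOn.go ['\n'] n rest (c :: cur) acc := by
  rw [PySem.Chars.splitOn.go]
  have hp : (['\n'].isPrefixOf (c :: rest)) = ('\n' == c) := by
    simp [List.isPrefixOf]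
  rw [hp]
  have hd : List.drop (['\n'].length) (c :: rest) = rest := rfl
  rw [hd]
  by_cases h : c = '\n'
  · simp [h]
  · have hb : ('\n' == c) = false := by simp [Ne.symm h]
    rw [hb]; simp [h]

theorem pv_go_nil (n : Nat) (cur : List Char) (acc : List (List Char)) :
    PySem.Chars.splitOn.go ['\n'] (n+1) [] cur acc = (cur.reverse :: acc).reverse := by
  rw [PySem.Chars.splitOn.go]; simp

theorem pv_go_eq (n : Nat) (l cur : List Char) (acc : List (List Char))
    (h : l.length < n) :
    PySem.Chars.splitOn.go ['\n'] n l cur acc = acc.reverse ++ pvSp l cur := by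
  induction n generalizing l cur acc with
  | zero => omega
  | succ m ih =>
      cases l with
      | nil => simp [pv_go_nil, pvSp]
      | cons c rest =>
          rw [pv_go_cons]
          by_cases hc : c = '\n'
          · rw [if_pos hc, ih rest [] _ (by simp at h; omega)]
            simp [pvSp, hc]
          · rw [if_neg hc, ih rest (c :: cur) acc (by simp at h; omega)]
            simp [pvSp, hc]

theorem pv_sp_ne_nil (l cur : List Char) : pvSp l cur ≠ [] := by
  induction l generalizing cur with
  | nil => simp [pvSp]
  | cons c rest ih =>
      by_cases hc : c = '\n' <;> simp [pvSp, hc, ih]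

theorem pv_join_sp (l cur : List Char) :
    ['\n'].intercalate (pvSp l cur) = cur.reverse ++ l := by
  induction l generalizing cur with
  | nil => simp [pvSp, List.intercalate]
  | cons c rest ih =>
      by_cases hc : c = '\n'
      · obtain ⟨y, ys, hy⟩ := List.exists_cons_of_ne_nil (pv_sp_ne_nil rest [])
        rw [pvSp, if_pos hc]
        have hcc : ['\n'].intercalate (cur.reverse :: y :: ys)
            = cur.reverse ++ ['\n'] ++ ['\n'].intercalate (y :: ys) := by
          simp [List.intercalate, List.intersperse]
        rw [hy, hcc, ← hy, ih]
        simp [hc]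
      · rw [pvSp, if_neg hc, ih]
        simp

theorem pv_join_split (code : String) :
    PySem.Str.join "\n" ((PySem.Str.split? code "\n").getD []) = code := by
  have hsplit : (PySem.Str.split? code "\n").getD []
      = (PySem.Chars.splitOn code.toList ['\n']).map String.ofList := by
    simp [PySem.Str.split?, PySem.Chars.split?]
  rw [hsplit, PySem.Str.join, PySem.Chars.join]
  have hmap : ((PySem.Chars.splitOn code.toList ['\n']).map String.ofList).map String.toList
      = PySem.Chars.splitOn code.toList ['\n'] := by
    simp [Function.comp_def]
  rw [hmap, PySem.Chars.splitOn,
      pv_go_eq (code.toList.length + 1) code.toList [] [] (by omega)]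
  simp [pv_join_sp]

-- split followed by join returns the list of lines as-is in both ports; the tails agree
theorem pv_main (code : String) :
    remove_entrypoint code = remove_entrypoint_alt code := by
  rw [remove_entrypoint, remove_entrypoint_alt, pv_lam_eq]
  cases hidx : ((PySem.Str.split? code "\n").getD []).findIdx? pvIsMarker with
  | none =>
      simp only [hidx, pv_fold_main, List.nil_append, pv_join_split]
  | some i =>
      simp only [hidx, pv_fold_main]
      simp

-- ===== VERDICT (by name: the statement is the Claim_ definition above) =====
theorem remove_entrypoint_spec : Claim_equal_remove_entrypoint := by
  intro code _
  unfold Spec_remove_entrypoint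
  exact pv_main code
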